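-- pv_equiv track=rewrite | github.com/zhepingLiu/COMP30024_zheping_alisha | part-B-skeleton-1.1/best_AI_ever/game_board.py | next_to
-- ===== SOURCE A (Python) =====
-- def next_to(position_1, position_2):
--     """
--     Check if two positions are next to each other on the hex game board
--     Input: position_1: the first given position
--            position_2: the second given position
--     Output: True if they are next to each other, otherwise False
--     """
--     HEX_STEPS = [(-1, 0), (0, -1), (1, -1), (1, 0), (0, 1), (-1, 1)]
--     (q1, r1) = position_1
--     (q2, r2) = position_2
--
--     for step_q, step_r in HEX_STEPS:
--         if (q1 + step_q, r1 + step_r) == (q2, r2):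
--             return True
--
--     return False
-- ===== SOURCE B (Python) =====
-- def next_to(position_1, position_2):
--     """Closed-form hex-distance test: adjacent iff cube distance equals 1."""
--     (q1, r1) = position_1
--     (q2, r2) = position_2
--     dq = q2 - q1
--     dr = r2 - r1
--     return max(abs(dq), abs(dr), abs(dq + dr)) == 1
-- ===== Notes on version B (the rewrite author's own statement) =====
-- stated objective: simpler
-- what changed: Replaced the scan over six neighbour offsets with a closed-form hex (cube) distance test: max(|dq|,|dr|,|dq+dr|) == 1.
import Mathlib
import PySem

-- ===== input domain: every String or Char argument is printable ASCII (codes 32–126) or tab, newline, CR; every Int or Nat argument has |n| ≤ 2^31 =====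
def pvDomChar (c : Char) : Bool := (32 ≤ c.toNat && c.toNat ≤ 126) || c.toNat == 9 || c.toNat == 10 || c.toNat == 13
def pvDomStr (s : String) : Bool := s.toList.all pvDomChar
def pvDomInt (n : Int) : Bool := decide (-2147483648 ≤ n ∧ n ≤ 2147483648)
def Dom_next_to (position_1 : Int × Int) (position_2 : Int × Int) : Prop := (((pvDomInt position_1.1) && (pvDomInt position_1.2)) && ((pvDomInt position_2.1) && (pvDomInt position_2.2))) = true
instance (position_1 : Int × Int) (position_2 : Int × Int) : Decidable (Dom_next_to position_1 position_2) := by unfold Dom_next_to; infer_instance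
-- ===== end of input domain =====

-- ===== PORT A =====
-- B replaces A's six-offset scan with the closed-form hex distance test max(|dq|,|dr|,|dq+dr|) == 1 (simpler; same value everywhere).
def nextToScan (q1 r1 q2 r2 : Int) : List (Int × Int) → Bool
  | [] => false
  | (sq, sr) :: rest =>
      if (q1 + sq, r1 + sr) = (q2, r2) then true
      else nextToScan q1 r1 q2 r2 rest

def next_to (position_1 : Int × Int) (position_2 : Int × Int) : Bool :=
  let HEX_STEPS : List (Int × Int) := [(-1, 0), (0, -1), (1, -1), (1, 0), (0, 1), (-1, 1)]
  let q1 := position_1.1; let r1 := position_1.2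
  let q2 := position_2.1; let r2 := position_2.2
  nextToScan q1 r1 q2 r2 HEX_STEPS

-- ===== PORT B =====
def next_to_alt (position_1 : Int × Int) (position_2 : Int × Int) : Bool :=
  let q1 := position_1.1; let r1 := position_1.2
  let q2 := position_2.1; let r2 := position_2.2
  let dq := q2 - q1
  let dr := r2 - r1
  decide (max (max |dq| |dr|) |dq + dr| = 1)

-- ===== PRECONDITION & SPEC =====
def Spec_next_to (position_1 : Int × Int) (position_2 : Int × Int) (out : Bool) : Prop := out = next_to_alt position_1 position_2
instance (position_1 : Int × Int) (position_2 : Int × Int) (out : Bool) : Decidable (Spec_next_to position_1 position_2 out) := by unfold Spec_next_to; infer_instance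

-- ===== CLAIM (what is proved, stated in full; the proofs are below) =====
def Claim_equal_next_to : Prop := ∀ (position_1 : Int × Int) (position_2 : Int × Int), Dom_next_to position_1 position_2 → Spec_next_to position_1 position_2 (next_to position_1 position_2)

-- ===== LEMMAS AND PROOFS =====

-- ===== VERDICT (by name: the statement is the Claim_ definition above) =====
-- The closed-form cube-distance test characterised as the six neighbour offsets.
theorem hexDist_eq_one_iff (dq dr : Int) :
    max (max |dq| |dr|) |dq + dr| = 1 ↔
      ((dq = -1 ∧ dr = 0) ∨ (dq = 0 ∧ dr = -1) ∨ (dq = 1 ∧ dr = -1) ∨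
       (dq = 1 ∧ dr = 0) ∨ (dq = 0 ∧ dr = 1) ∨ (dq = -1 ∧ dr = 1)) := by
  rcases abs_cases dq with ⟨h1, _⟩ | ⟨h1, _⟩ <;>
    rcases abs_cases dr with ⟨h2, _⟩ | ⟨h2, _⟩ <;>
      rcases abs_cases (dq + dr) with ⟨h3, _⟩ | ⟨h3, _⟩ <;>
        rw [h1, h2, h3] <;> simp only [max_def] <;> split_ifs <;> omega

theorem next_to_spec : Claim_equal_next_to := by
  intro p1 p2 _
  obtain ⟨q1, r1⟩ := p1
  obtain ⟨q2, r2⟩ := p2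
  unfold Spec_next_to next_to next_to_alt
  simp only [nextToScan, Prod.mk.injEq]
  rw [decide_eq_decide.mpr (hexDist_eq_one_iff (q2 - q1) (r2 - r1))]
  split_ifs <;> simp <;> omega
  infer_instance
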